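-- pv_equiv track=rewrite | github.com/trinhvankhanh000/tuan4_nganxep | Chuong_6_cpp/6.18.py | min_transformations
-- ===== SOURCE A (Python) =====
-- from collections import deque
--
-- def rotate_left(state):
--     new_state = state[:]
--     new_state[0], new_state[1], new_state[3], new_state[4] = state[3], state[0], state[4], state[1]
--     return new_state
--
-- def rotate_right(state):
--     new_state = state[:]
--     new_state[1], new_state[2], new_state[4], new_state[5] = state[4], state[1], state[5], state[2]
--     return new_state
--
-- def min_transformations(start, target):
--     queue = deque([(start, 0)])  # (trạng thái hiện tại, số bước)
--     visited = set()
--     visited.add(tuple(start))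
--
--     while queue:
--         current, steps = queue.popleft()
--         if current == target:
--             return steps
--         # Quay miếng ghép bên trái
--         left_rotated = rotate_left(current)
--         if tuple(left_rotated) not in visited:
--             visited.add(tuple(left_rotated))
--             queue.append((left_rotated, steps + 1))
--         # Quay miếng ghép bên phải
--         right_rotated = rotate_right(current)
--         if tuple(right_rotated) not in visited:
--             visited.add(tuple(right_rotated))
--             queue.append((right_rotated, steps + 1))
--     return -1
-- ===== SOURCE B (Python) =====
-- # Group-theoretic re-implementation: the two rotations are fixed index permutations
-- # of the first six positions, so the whole search is input-independent.  A constant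
-- # table _PERM_TABLE maps every index permutation reachable from the identity to its
-- # minimal word length (computed once at import time); a call then just compares the
-- # tails and takes the minimum table distance over the permutations that send
-- # start[:6] to target[:6].
--
-- _L = [3, 0, 2, 4, 1, 5]   # rotate_left as an index permutation: new[i] = old[_L[i]]
-- _R = [0, 4, 1, 3, 5, 2]   # rotate_right as an index permutation
--
-- def _perm_table():
--     ident = (0, 1, 2, 3, 4, 5)
--     table = {ident: 0}
--     frontier = [ident]
--     d = 0
--     while frontier:
--         d += 1
--         new = []
--         for p in frontier:
--             for m in (_L, _R):
--                 q = tuple(p[i] for i in m)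
--                 if q not in table:
--                     table[q] = d
--                     new.append(q)
--         frontier = new
--     return table
--
-- _PERM_TABLE = _perm_table()
--
-- def min_transformations(start, target):
--     if start == target:
--         return 0
--     if start[6:] != target[6:]:
--         return -1
--     s6 = start[:6]
--     t6 = target[:6]
--     best = -1
--     for p, d in _PERM_TABLE.items():
--         if [s6[i] for i in p] == t6 and (best == -1 or d < best):
--             best = d
--     return best
-- ===== Notes on version B (the rewrite author's own statement) =====
-- stated objective: faster
-- what changed: Replaces A's per-input BFS over whole list states with a constant, input-independent distance table over the 120 index permutations generated by the two rotations (built once at import), so a call only compares the tails beyond index 6 and takes the minimum table distance over permutations sending start[:6] to target[:6].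
import Mathlib
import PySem

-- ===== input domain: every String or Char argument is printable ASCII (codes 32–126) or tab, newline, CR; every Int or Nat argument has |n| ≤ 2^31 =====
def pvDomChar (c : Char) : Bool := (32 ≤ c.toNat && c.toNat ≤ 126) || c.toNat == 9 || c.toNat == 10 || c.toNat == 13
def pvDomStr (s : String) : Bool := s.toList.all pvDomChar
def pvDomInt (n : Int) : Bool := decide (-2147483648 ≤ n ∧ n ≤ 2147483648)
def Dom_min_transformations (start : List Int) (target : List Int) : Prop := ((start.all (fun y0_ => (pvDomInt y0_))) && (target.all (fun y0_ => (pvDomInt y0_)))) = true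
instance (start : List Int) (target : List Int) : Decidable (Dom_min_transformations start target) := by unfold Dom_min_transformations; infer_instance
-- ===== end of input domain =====

-- B replaces A's per-input BFS over whole list states by a constant distance table
-- over the index permutations generated by the two rotations, built once, plus a
-- tail comparison and a minimum scan; objective: faster (no per-call search, no
-- copying of full-length lists).

-- ===== PORT A =====
-- Helper of A: rotate_left. The index reads/writes are exact for states of length
-- ≥ 5 (resp. ≥ 6 for rotate_right); shorter states raise IndexError in Python and
-- are excluded by Pre_ (rotations only ever run with start.length ≥ 6).
def pvRotL (state : List Int) : List Int :=
  PySem.List.pySetD (PySem.List.pySetD (PySem.List.pySetD (PySem.List.pySetD state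
    0 (PySem.List.pyGetD state 3 0)) 1 (PySem.List.pyGetD state 0 0))
    3 (PySem.List.pyGetD state 4 0)) 4 (PySem.List.pyGetD state 1 0)

-- Helper of A: rotate_right (same exactness note as pvRotL).
def pvRotR (state : List Int) : List Int :=
  PySem.List.pySetD (PySem.List.pySetD (PySem.List.pySetD (PySem.List.pySetD state
    1 (PySem.List.pyGetD state 4 0)) 2 (PySem.List.pyGetD state 1 0))
    4 (PySem.List.pyGetD state 5 0)) 5 (PySem.List.pyGetD state 2 0)

-- A's while-loop over the deque of (state, steps) pairs. The fuel is only a totality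
-- guard (proved sufficient below: visited never exceeds (start.take 6).length !
-- distinct states, so the loop pops fewer times than the fuel provides). The Python's
-- single `if tuple(..) not in visited` guarding both the set-add and the enqueue is
-- split into its two components (same test, evaluated on the same set).
def pvALoop (target : List Int) : Nat → List (List Int × Int) → PySem.Set (List Int) → Int
  | _, [], _ => -1
  | 0, _ :: _, _ => -1
  | fuel + 1, (current, steps) :: queue, visited =>
    if current = target then steps
    else
      let l := pvRotL current
      let visited1 := if PySem.Set.contains visited l then visited else PySem.Set.add visited l
      let queue1 := if PySem.Set.contains visited l then queue else queue ++ [(l, steps + 1)]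
      let r := pvRotR current
      let visited2 := if PySem.Set.contains visited1 r then visited1 else PySem.Set.add visited1 r
      let queue2 := if PySem.Set.contains visited1 r then queue1 else queue1 ++ [(r, steps + 1)]
      pvALoop target fuel queue2 visited2

def min_transformations (start : List Int) (target : List Int) : Int :=
  pvALoop target (2 * Nat.factorial (start.take 6).length + 1)
    [(start, 0)] (PySem.Set.add PySem.Set.empty start)

-- ===== PORT B =====
-- B's module constants _L and _R: the two rotations as index permutations.
def pvL : List Int := [3, 0, 2, 4, 1, 5]
def pvR : List Int := [0, 4, 1, 3, 5, 2]

-- B's comprehension `[xs[i] for i in p]` (used both for composing permutations and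
-- for applying one to start[:6]); the indices are always in range there, so pyGetD
-- with default 0 is exact.
def pvApp (p xs : List Int) : List Int := p.map (fun i => PySem.List.pyGetD xs i 0)

-- B's `if q not in table: table[q] = d; new.append(q)`.
def pvTblAdd (d : Int) (acc : PySem.Dict (List Int) Int × List (List Int)) (q : List Int) :
    PySem.Dict (List Int) Int × List (List Int) :=
  if PySem.Dict.contains acc.1 q then acc else (PySem.Dict.insert acc.1 q d, acc.2 ++ [q])

-- B's `for m in (_L, _R):` body for one frontier permutation.
def pvTblExpand (d : Int) (acc : PySem.Dict (List Int) Int × List (List Int))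
    (p : List Int) : PySem.Dict (List Int) Int × List (List Int) :=
  [pvApp pvL p, pvApp pvR p].foldl (pvTblAdd d) acc

-- B's `while frontier:` loop of _perm_table (Python's `d += 1` at the head of the
-- body is modelled by passing d and using d+1 throughout the level). The fuel is a
-- totality guard only, proved sufficient below: the table holds distinct
-- permutations of [0..5], so at most 6! = 720 levels can add a key.
def pvTblLoop : Nat → PySem.Dict (List Int) Int → List (List Int) → Int →
    PySem.Dict (List Int) Int
  | 0, table, _, _ => table
  | fuel + 1, table, frontier, d =>
    if frontier = [] then table
    else
      let p := frontier.foldl (pvTblExpand (d + 1)) (table, [])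
      pvTblLoop fuel p.1 p.2 (d + 1)

-- B's module constant _PERM_TABLE = _perm_table().
def pvPermTable : PySem.Dict (List Int) Int :=
  pvTblLoop (Nat.factorial 6 + 2)
    (PySem.Dict.ofList [([0, 1, 2, 3, 4, 5], 0)]) [[0, 1, 2, 3, 4, 5]] 0

def min_transformations_alt (start : List Int) (target : List Int) : Int :=
  if start = target then 0
  else if PySem.List.slice start (some 6) none ≠ PySem.List.slice target (some 6) none then -1
  else
    let s6 := PySem.List.slice start none (some 6)
    let t6 := PySem.List.slice target none (some 6)
    pvPermTable.items.foldl
      (fun best pd =>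
        if pvApp pd.1 s6 = t6 ∧ (best = -1 ∨ pd.2 < best) then pd.2 else best) (-1)

-- ===== PRECONDITION & SPEC =====
-- Pre_ excludes exactly the inputs where Python A raises IndexError: start ≠ target
-- with start.length < 6 (rotate_right reads index 5; rotate_left index 4). When
-- start = target A returns 0 before any rotation, whatever the length.
def Pre_min_transformations (start : List Int) (target : List Int) : Prop :=
  start = target ∨ 6 ≤ start.length
instance (start : List Int) (target : List Int) : Decidable (Pre_min_transformations start target) := by unfold Pre_min_transformations; infer_instance

def pvWitness_min_transformations : List Int × List Int := ([1, 2, 3, 4, 5, 6], [4, 1, 3, 5, 2, 6])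

def Spec_min_transformations (start : List Int) (target : List Int) (out : Int) : Prop := out = min_transformations_alt start target
instance (start : List Int) (target : List Int) (out : Int) : Decidable (Spec_min_transformations start target out) := by unfold Spec_min_transformations; infer_instance

-- ===== CLAIM (what is proved, stated in full; the proofs are below) =====
def Claim_equal_min_transformations : Prop := ∀ (start : List Int) (target : List Int), Dom_min_transformations start target → Pre_min_transformations start target → Spec_min_transformations start target (min_transformations start target)

-- ===== LEMMAS AND PROOFS =====

-- ---------- generic reachability notions ----------

-- Ball of radius k around s in the graph with neighbour function nb.
def pvBall (nb : List Int → List (List Int)) (s : List Int) : Nat → List Int → Prop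
  | 0, z => z = s
  | k + 1, z => pvBall nb s k z ∨ ∃ x, pvBall nb s k x ∧ z ∈ nb x

-- Sphere: states whose least level is exactly k.
def pvSph (nb : List Int → List (List Int)) (s : List Int) (k : Nat) (z : List Int) : Prop :=
  pvBall nb s k z ∧ ∀ j, j < k → ¬ pvBall nb s j z

def pvNbL : List Int → List (List Int) := fun x => [pvRotL x, pvRotR x]
def pvNbP : List Int → List (List Int) := fun q => [pvApp pvL q, pvApp pvR q]
def pvIdent : List Int := [0, 1, 2, 3, 4, 5]

lemma pvBall_mono {nb s} {j k : Nat} (h : j ≤ k) {z} (hz : pvBall nb s j z) :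
    pvBall nb s k z := by
  induction k with
  | zero => exact (Nat.le_zero.mp h) ▸ hz
  | succ k ih =>
      rcases Nat.lt_or_ge j (k + 1) with hlt | hge
      · exact Or.inl (ih (Nat.lt_succ_iff.mp hlt))
      · exact (Nat.le_antisymm h hge) ▸ hz

lemma pvSph_exists {nb s k z} (h : pvBall nb s k z) : ∃ j, j ≤ k ∧ pvSph nb s j z := by
  have hne : {j | pvBall nb s j z}.Nonempty := ⟨k, h⟩
  have hmem : sInf {j | pvBall nb s j z} ∈ {j | pvBall nb s j z} := Nat.sInf_mem hne
  refine ⟨sInf {j | pvBall nb s j z}, Nat.sInf_le h, hmem, ?_⟩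
  intro j hj hb
  exact absurd (Nat.sInf_le (show j ∈ {j | pvBall nb s j z} from hb)) (by omega)

lemma pvSph_succ_iff {nb s k z} :
    pvSph nb s (k + 1) z ↔ pvBall nb s (k + 1) z ∧ ¬ pvBall nb s k z := by
  constructor
  · exact fun h => ⟨h.1, h.2 k (Nat.lt_succ_self k)⟩
  · refine fun h => ⟨h.1, fun j hj hb => h.2 (pvBall_mono (by omega) hb)⟩

lemma pvSph_unique {nb s j k z} (hj : pvSph nb s j z) (hk : pvSph nb s k z) : j = k := by
  rcases Nat.lt_trichotomy j k with h | h | h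
  · exact absurd hj.1 (hk.2 j h)
  · exact h
  · exact absurd hk.1 (hj.2 k h)

-- If the sphere at level k is empty, the ball never grows beyond level k.
lemma pvBall_stab {nb s k} (h : ∀ z, ¬ pvSph nb s k z) :
    ∀ m z, pvBall nb s m z → pvBall nb s k z := by
  have hstep : ∀ z, pvBall nb s (k + 1) z → pvBall nb s k z := by
    intro z hz
    rcases hz with hz | ⟨x, hx, hnb⟩
    · exact hz
    · obtain ⟨j, hjk, hsp⟩ := pvSph_exists hx
      rcases Nat.lt_or_ge j k with hlt | hge
      · exact pvBall_mono (show j + 1 ≤ k by omega)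
          (show pvBall nb s (j + 1) z from Or.inr ⟨x, hsp.1, hnb⟩)
      · exact absurd ((Nat.le_antisymm hjk hge) ▸ hsp) (h x)
  intro m
  induction m with
  | zero => exact fun z hz => pvBall_mono (Nat.zero_le k) hz
  | succ m ih =>
      intro z hz
      rcases Nat.lt_or_ge m k with hlt | hge
      · exact pvBall_mono (by omega) hz
      · rcases hz with hz | ⟨x, hx, hnb⟩
        · exact ih z hz
        · exact hstep z (Or.inr ⟨x, ih x hx, hnb⟩)

-- ---------- A-side: explicit rotations, shape invariant ----------

lemma pvRotL_explicit (a b c d e f : Int) (t : List Int) :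
    pvRotL (a :: b :: c :: d :: e :: f :: t) = d :: a :: c :: e :: b :: f :: t := by
  simp [pvRotL, pysem]

lemma pvRotR_explicit (a b c d e f : Int) (t : List Int) :
    pvRotR (a :: b :: c :: d :: e :: f :: t) = a :: e :: b :: d :: f :: c :: t := by
  simp [pvRotR, pysem]

def pvShape (start x : List Int) : Prop :=
  (x.take 6).Perm (start.take 6) ∧ x.drop 6 = start.drop 6

lemma pvShape_decomp {start x : List Int} (hlen : 6 ≤ start.length) (hx : pvShape start x) :
    ∃ a b c d e f t, x = a :: b :: c :: d :: e :: f :: t := by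
  have h6 : 6 ≤ x.length := by
    have := hx.1.length_eq
    simp [List.length_take] at this
    omega
  match x, h6 with
  | a :: b :: c :: d :: e :: f :: t, _ => exact ⟨a, b, c, d, e, f, t, rfl⟩

lemma pvShape_rotL {start x : List Int} (hlen : 6 ≤ start.length) (hx : pvShape start x) :
    pvShape start (pvRotL x) := by
  obtain ⟨a, b, c, d, e, f, t, rfl⟩ := pvShape_decomp hlen hx
  rw [pvRotL_explicit]
  obtain ⟨hp, hd⟩ := hx
  refine ⟨List.Perm.trans ?_ hp, hd⟩
  refine List.perm_iff_count.mpr fun y => ?_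
  simp [List.count_cons]
  ring

lemma pvShape_rotR {start x : List Int} (hlen : 6 ≤ start.length) (hx : pvShape start x) :
    pvShape start (pvRotR x) := by
  obtain ⟨a, b, c, d, e, f, t, rfl⟩ := pvShape_decomp hlen hx
  rw [pvRotR_explicit]
  obtain ⟨hp, hd⟩ := hx
  refine ⟨List.Perm.trans ?_ hp, hd⟩
  refine List.perm_iff_count.mpr fun y => ?_
  simp [List.count_cons]
  ring

lemma pvShape_card {start : List Int} (v : PySem.Set (List Int))
    (hnd : v.Nodup) (hs : ∀ z ∈ v, pvShape start z) :
    v.length ≤ Nat.factorial (start.take 6).length := by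
  have hsub : v ⊆ (start.take 6).permutations.map (fun p => p ++ start.drop 6) := by
    intro z hz
    obtain ⟨hp, hd⟩ := hs z hz
    refine List.mem_map.mpr ⟨z.take 6, List.mem_permutations.mpr hp, ?_⟩
    rw [← hd]
    exact List.take_append_drop 6 z
  calc v.length ≤ ((start.take 6).permutations.map (fun p => p ++ start.drop 6)).length :=
        (List.subperm_of_subset hnd hsub).length_le
    _ = Nat.factorial (start.take 6).length := by
        simp [List.length_permutations]

lemma pvBallL_shape {start : List Int} (hlen : 6 ≤ start.length) :
    ∀ k z, pvBall pvNbL start k z → pvShape start z := by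
  intro k
  induction k with
  | zero => intro z hz; exact hz ▸ ⟨List.Perm.refl _, rfl⟩
  | succ k ih =>
      intro z hz
      rcases hz with hz | ⟨x, hx, hnb⟩
      · exact ih z hz
      · rcases (by simpa [pvNbL] using hnb : z = pvRotL x ∨ z = pvRotR x) with rfl | rfl
        · exact pvShape_rotL hlen (ih x hx)
        · exact pvShape_rotR hlen (ih x hx)

-- ---------- A-side: collapse of the queue BFS to a level-synchronised loop ----------

def pvStep (acc : PySem.Set (List Int) × List (List Int)) (nxt : List Int) :
    PySem.Set (List Int) × List (List Int) :=
  if PySem.Set.contains acc.1 nxt then acc else (PySem.Set.add acc.1 nxt, acc.2 ++ [nxt])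

def pvExpand (acc : PySem.Set (List Int) × List (List Int)) (state : List Int) :
    PySem.Set (List Int) × List (List Int) :=
  [pvRotL state, pvRotR state].foldl pvStep acc

def pvLvl (target : List Int) : Nat → List (List Int) → PySem.Set (List Int) → Int → Int
  | 0, _, _, _ => -1
  | fuel + 1, frontier, visited, steps =>
    if frontier = [] then -1
    else if target ∈ frontier then steps
    else
      let p := frontier.foldl pvExpand (visited, [])
      pvLvl target fuel p.2 p.1 (steps + 1)

lemma pvStep_glue {w : PySem.Set (List Int)} {acc : PySem.Set (List Int) × List (List Int)}
    (h : acc.1 = w ++ acc.2) (y : List Int) : (pvStep acc y).1 = w ++ (pvStep acc y).2 := by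
  unfold pvStep
  split_ifs with hc
  · exact h
  · have hm : ¬ y ∈ acc.1 := fun hm => hc ((PySem.Set.contains_iff acc.1 y).mpr hm)
    simp only []
    rw [PySem.Set.add_of_not_mem hm, h, List.append_assoc]

lemma pvExpand_glue {w : PySem.Set (List Int)} {acc : PySem.Set (List Int) × List (List Int)}
    (h : acc.1 = w ++ acc.2) (c : List Int) : (pvExpand acc c).1 = w ++ (pvExpand acc c).2 := by
  unfold pvExpand
  simp only [List.foldl]
  exact pvStep_glue (pvStep_glue h _) _

lemma pvFold_glue {w : PySem.Set (List Int)} :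
    ∀ (l : List (List Int)) (acc : PySem.Set (List Int) × List (List Int)),
      acc.1 = w ++ acc.2 →
      (l.foldl pvExpand acc).1 = w ++ (l.foldl pvExpand acc).2 := by
  intro l
  induction l with
  | nil => intro acc h; exact h
  | cons c r ih => intro acc h; exact ih _ (pvExpand_glue h c)

def pvFoldInv (start : List Int) (acc : PySem.Set (List Int) × List (List Int)) : Prop :=
  acc.1.Nodup ∧ (∀ z ∈ acc.1, pvShape start z)

lemma pvStep_inv {start : List Int} {acc : PySem.Set (List Int) × List (List Int)}
    (h : pvFoldInv start acc) {y : List Int} (hy : pvShape start y) :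
    pvFoldInv start (pvStep acc y) := by
  unfold pvStep
  split_ifs with hc
  · exact h
  · refine ⟨PySem.Set.nodup_add _ _ h.1, fun z hz => ?_⟩
    rcases (PySem.Set.mem_add _ _ _).mp hz with hz | hz
    · exact h.2 z hz
    · exact hz ▸ hy

lemma pvExpand_inv {start : List Int} (hlen : 6 ≤ start.length)
    {acc : PySem.Set (List Int) × List (List Int)} (h : pvFoldInv start acc)
    {c : List Int} (hc : pvShape start c) : pvFoldInv start (pvExpand acc c) := by
  unfold pvExpand
  simp only [List.foldl]
  exact pvStep_inv (pvStep_inv h (pvShape_rotL hlen hc)) (pvShape_rotR hlen hc)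

lemma pvFold_inv {start : List Int} (hlen : 6 ≤ start.length) :
    ∀ (l : List (List Int)) (acc : PySem.Set (List Int) × List (List Int)),
      pvFoldInv start acc → (∀ z ∈ l, pvShape start z) →
      pvFoldInv start (l.foldl pvExpand acc) := by
  intro l
  induction l with
  | nil => intro acc h _; exact h
  | cons c r ih =>
      intro acc h hl
      exact ih _ (pvExpand_inv hlen h (hl c (by simp))) (fun z hz => hl z (by simp [hz]))

lemma pvALoop_nil (target : List Int) (fa : Nat) (v : PySem.Set (List Int)) :
    pvALoop target fa [] v = -1 := by
  cases fa <;> rfl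

lemma pvCollapse (target : List Int) :
    ∀ (rest : List (List Int)) (fa : Nat) (next : List (List Int))
      (v : PySem.Set (List Int)) (s : Int),
      rest.length ≤ fa →
      pvALoop target fa (rest.map (fun x => (x, s)) ++ next.map (fun x => (x, s + 1))) v =
        if target ∈ rest then s
        else pvALoop target (fa - rest.length)
          ((rest.foldl pvExpand (v, next)).2.map (fun x => (x, s + 1)))
          (rest.foldl pvExpand (v, next)).1 := by
  intro rest
  induction rest with
  | nil => intro fa next v s _; simp
  | cons c r ih =>
      intro fa next v s hfa
      cases fa with
      | zero => simp at hfa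
      | succ f =>
          have hfr : r.length ≤ f := by
            simp only [List.length_cons] at hfa; omega
          by_cases hc : c = target
          · subst hc
            simp [pvALoop]
          · have htc : (target ∈ c :: r) = (target ∈ r) := by
              simp only [List.mem_cons, eq_comm (a := target)]
              simp [hc]
            simp only [List.map_cons, List.cons_append, pvALoop, if_neg hc, htc,
              List.foldl_cons]
            by_cases hm1 : pvRotL c ∈ v
            · have e1 : PySem.Set.contains v (pvRotL c) = true :=
                (PySem.Set.contains_iff v _).mpr hm1
              by_cases hm2 : pvRotR c ∈ v
              · have e2 : PySem.Set.contains v (pvRotR c) = true :=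
                  (PySem.Set.contains_iff v _).mpr hm2
                have he : List.foldl pvExpand (pvExpand (v, next) c) r =
                    List.foldl pvExpand (v, next) r := by
                  have : pvExpand (v, next) c = (v, next) := by
                    simp [pvExpand, pvStep, hm1, hm2]
                  rw [this]
                simp only [e1, e2, reduceIte, he]
                rw [ih f next v s hfr]
                simp [Nat.succ_sub_succ]
              · have e2 : PySem.Set.contains v (pvRotR c) = false := by
                  rcases h : PySem.Set.contains v (pvRotR c) with _ | _
                  · rfl
                  · exact absurd ((PySem.Set.contains_iff v _).mp h) hm2
                have he : pvExpand (v, next) c =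
                    (PySem.Set.add v (pvRotR c), next ++ [pvRotR c]) := by
                  simp [pvExpand, pvStep, hm1, hm2]
                simp only [e1, e2, Bool.false_eq_true, if_false, reduceIte, he]
                rw [show (r.map (fun x => (x, s)) ++ next.map (fun x => (x, s + 1))) ++
                      [(pvRotR c, s + 1)] =
                    r.map (fun x => (x, s)) ++ (next ++ [pvRotR c]).map (fun x => (x, s + 1))
                  by simp]
                rw [ih f (next ++ [pvRotR c]) (PySem.Set.add v (pvRotR c)) s hfr]
                simp [Nat.succ_sub_succ]
            · have e1 : PySem.Set.contains v (pvRotL c) = false := by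
                rcases h : PySem.Set.contains v (pvRotL c) with _ | _
                · rfl
                · exact absurd ((PySem.Set.contains_iff v _).mp h) hm1
              by_cases hm2 : pvRotR c ∈ PySem.Set.add v (pvRotL c)
              · have e2 : PySem.Set.contains (PySem.Set.add v (pvRotL c)) (pvRotR c) = true :=
                  (PySem.Set.contains_iff _ _).mpr hm2
                have he : pvExpand (v, next) c =
                    (PySem.Set.add v (pvRotL c), next ++ [pvRotL c]) := by
                  simp [pvExpand, pvStep, hm1]
                  intro hnv
                  rcases (PySem.Set.mem_add v (pvRotL c) (pvRotR c)).mp hm2 with h | h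
                  · exact absurd h hnv
                  · exact h
                simp only [e1, e2, Bool.false_eq_true, if_false, reduceIte, he]
                rw [show (r.map (fun x => (x, s)) ++ next.map (fun x => (x, s + 1))) ++
                      [(pvRotL c, s + 1)] =
                    r.map (fun x => (x, s)) ++ (next ++ [pvRotL c]).map (fun x => (x, s + 1))
                  by simp]
                rw [ih f (next ++ [pvRotL c]) (PySem.Set.add v (pvRotL c)) s hfr]
                simp [Nat.succ_sub_succ]
              · have e2 : PySem.Set.contains (PySem.Set.add v (pvRotL c)) (pvRotR c) = false := by
                  rcases h : PySem.Set.contains (PySem.Set.add v (pvRotL c)) (pvRotR c) with _ | _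
                  · rfl
                  · exact absurd ((PySem.Set.contains_iff _ _).mp h) hm2
                have he : pvExpand (v, next) c =
                    (PySem.Set.add (PySem.Set.add v (pvRotL c)) (pvRotR c),
                      next ++ [pvRotL c] ++ [pvRotR c]) := by
                  simp [pvExpand, pvStep, hm1]
                  exact ⟨fun h => hm2 ((PySem.Set.mem_add v (pvRotL c) (pvRotR c)).mpr (Or.inl h)),
                    fun h => hm2 ((PySem.Set.mem_add v (pvRotL c) (pvRotR c)).mpr (Or.inr h))⟩
                simp only [e1, e2, Bool.false_eq_true, if_false, he]
                rw [show ((r.map (fun x => (x, s)) ++ next.map (fun x => (x, s + 1))) ++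
                      [(pvRotL c, s + 1)]) ++ [(pvRotR c, s + 1)] =
                    r.map (fun x => (x, s)) ++
                      (next ++ [pvRotL c] ++ [pvRotR c]).map (fun x => (x, s + 1))
                  by simp]
                rw [ih f (next ++ [pvRotL c] ++ [pvRotR c])
                  (PySem.Set.add (PySem.Set.add v (pvRotL c)) (pvRotR c)) s hfr]
                simp [Nat.succ_sub_succ]

lemma pvSim (start target : List Int) (hlen : 6 ≤ start.length) :
    ∀ (fb : Nat) (frontier : List (List Int)) (v : PySem.Set (List Int)) (s : Int) (fa : Nat),
      v.Nodup → (∀ z ∈ v, pvShape start z) → (∀ z ∈ frontier, pvShape start z) →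
      frontier.length + 2 * (Nat.factorial (start.take 6).length - v.length) ≤ fa →
      (Nat.factorial (start.take 6).length - v.length) + 2 ≤ fb →
      pvALoop target fa (frontier.map (fun x => (x, s))) v = pvLvl target fb frontier v s := by
  intro fb
  induction fb with
  | zero => intro frontier v s fa _ _ _ _ hb; omega
  | succ fb ih =>
      intro frontier v s fa hnd hvs hfs hpa hpb
      by_cases hf : frontier = []
      · subst hf
        simp only [List.map_nil, pvALoop_nil]
        simp [pvLvl]
      · have hcoll := pvCollapse target frontier fa [] v s
          (le_trans (Nat.le_add_right _ _) hpa)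
        simp only [List.map_nil, List.append_nil] at hcoll
        by_cases ht : target ∈ frontier
        · rw [hcoll, if_pos ht]
          simp [pvLvl, hf, ht]
        · rw [hcoll, if_neg ht]
          have hinv : pvFoldInv start (frontier.foldl pvExpand (v, [])) :=
            pvFold_inv hlen frontier (v, []) ⟨hnd, hvs⟩ hfs
          have hglue : (frontier.foldl pvExpand (v, [])).1 =
              v ++ (frontier.foldl pvExpand (v, [])).2 :=
            pvFold_glue frontier (v, []) (by simp)
          set p := frontier.foldl pvExpand (v, []) with hp
          have hcard : p.1.length ≤ Nat.factorial (start.take 6).length :=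
            pvShape_card p.1 hinv.1 hinv.2
          have hlenp : p.1.length = v.length + p.2.length := by
            rw [hglue]; simp
          have hvcard : v.length ≤ Nat.factorial (start.take 6).length := by omega
          have hns : ∀ z ∈ p.2, pvShape start z := by
            intro z hz
            exact hinv.2 z (by rw [hglue]; simp [hz])
          rw [show pvLvl target (fb + 1) frontier v s =
              pvLvl target fb p.2 p.1 (s + 1) by simp [pvLvl, hf, ht, hp]]
          by_cases hnf : p.2 = []
          · rw [hnf]
            simp only [List.map_nil, pvALoop_nil]
            have : 1 ≤ fb := by omega
            cases fb with
            | zero => omega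
            | succ fb' => simp [pvLvl]
          · exact ih p.2 p.1 (s + 1) (fa - frontier.length) hinv.1 hinv.2 hns
              (by
                have hnfl : 1 ≤ p.2.length := by
                  cases p2 : p.2 with
                  | nil => exact absurd p2 hnf
                  | cons _ _ => simp
                omega)
              (by
                have hnfl : 1 ≤ p.2.length := by
                  cases p2 : p.2 with
                  | nil => exact absurd p2 hnf
                  | cons _ _ => simp
                omega)

lemma pvA_eq_lvl (start target : List Int) (hlen : 6 ≤ start.length) :
    min_transformations start target =
      pvLvl target (Nat.factorial (start.take 6).length + 2) [start] [start] 0 := by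
  unfold min_transformations
  have hv : PySem.Set.add PySem.Set.empty start = [start] := rfl
  rw [hv]
  have hN : 1 ≤ Nat.factorial (start.take 6).length := Nat.factorial_pos _
  exact pvSim start target hlen (Nat.factorial (start.take 6).length + 2) [start]
    [start] 0 (2 * Nat.factorial (start.take 6).length + 1)
    (by simp) (fun z hz => by simp at hz; exact hz ▸ ⟨List.Perm.refl _, rfl⟩)
    (fun z hz => by simp at hz; exact hz ▸ ⟨List.Perm.refl _, rfl⟩)
    (by simp; omega) (by omega)

-- ---------- A-side: the level loop returns the least reachable level ----------

lemma pvStep_mem (acc : PySem.Set (List Int) × List (List Int)) (y z : List Int) :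
    z ∈ (pvStep acc y).1 ↔ z ∈ acc.1 ∨ z = y := by
  unfold pvStep
  split_ifs with hc
  · have := (PySem.Set.contains_iff acc.1 y).mp hc
    constructor
    · exact Or.inl
    · rintro (h | rfl) <;> [exact h; exact this]
  · simp [PySem.Set.mem_add]

lemma pvExpand_mem (acc : PySem.Set (List Int) × List (List Int)) (c z : List Int) :
    z ∈ (pvExpand acc c).1 ↔ z ∈ acc.1 ∨ z = pvRotL c ∨ z = pvRotR c := by
  unfold pvExpand
  simp only [List.foldl]
  rw [pvStep_mem, pvStep_mem]
  tauto

lemma pvFold_mem :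
    ∀ (l : List (List Int)) (acc : PySem.Set (List Int) × List (List Int)) (z : List Int),
      z ∈ (l.foldl pvExpand acc).1 ↔
        z ∈ acc.1 ∨ ∃ x ∈ l, z = pvRotL x ∨ z = pvRotR x := by
  intro l
  induction l with
  | nil => simp
  | cons c r ih =>
      intro acc z
      simp only [List.foldl_cons, ih, pvExpand_mem, List.mem_cons]
      constructor
      · rintro ((h | h | h) | ⟨x, hx, hh⟩)
        · exact Or.inl h
        · exact Or.inr ⟨c, Or.inl rfl, Or.inl h⟩
        · exact Or.inr ⟨c, Or.inl rfl, Or.inr h⟩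
        · exact Or.inr ⟨x, Or.inr hx, hh⟩
      · rintro (h | ⟨x, (rfl | hx), hh⟩)
        · exact Or.inl (Or.inl h)
        · exact Or.inl (Or.inr hh)
        · exact Or.inr ⟨x, hx, hh⟩

-- The level loop: -1 exactly on unreachable targets, else the least level.
lemma pvLvl_nil (target : List Int) (fuel : Nat) (v : PySem.Set (List Int)) (s : Int) :
    pvLvl target fuel [] v s = -1 := by
  cases fuel <;> simp [pvLvl]

lemma pvLvl_correct (start target : List Int) (hlen : 6 ≤ start.length) :
    ∀ (fuel k : Nat) (frontier : List (List Int)) (visited : PySem.Set (List Int)),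
      (∀ z, z ∈ visited ↔ pvBall pvNbL start k z) →
      (∀ z, z ∈ frontier ↔ pvSph pvNbL start k z) →
      visited.Nodup →
      (∀ j, j < k → ¬ pvBall pvNbL start j target) →
      (Nat.factorial (start.take 6).length - visited.length) + 2 ≤ fuel →
      ((¬ (∃ j, pvBall pvNbL start j target)) →
          pvLvl target fuel frontier visited (k : Int) = -1) ∧
      (∀ m : Nat, pvSph pvNbL start m target →
          pvLvl target fuel frontier visited (k : Int) = (m : Int)) := by
  intro fuel
  induction fuel with
  | zero => intro k frontier visited _ _ _ _ hfuel; exact absurd hfuel (by omega)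
  | succ fuel ih =>
      intro k frontier visited Hv Hf Hnd Hprev Hfuel
      by_cases hfe : frontier = []
      · subst hfe
        have hempty : ∀ z, ¬ pvSph pvNbL start k z := fun z hz => by
          have := (Hf z).mpr hz
          simp at this
        have hunreach : ¬ ∃ j, pvBall pvNbL start j target := by
          rintro ⟨j, hj⟩
          have hk : pvBall pvNbL start k target := pvBall_stab hempty j target hj
          obtain ⟨j', hj'k, hsp⟩ := pvSph_exists hk
          rcases Nat.lt_or_ge j' k with h | h
          · exact Hprev j' h hsp.1
          · exact hempty target ((Nat.le_antisymm hj'k h) ▸ hsp)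
        exact ⟨fun _ => by simp [pvLvl],
          fun m hm => False.elim (hunreach ⟨m, hm.1⟩)⟩
      · by_cases htf : target ∈ frontier
        · have hsp : pvSph pvNbL start k target := (Hf target).mp htf
          refine ⟨fun hun => False.elim (hun ⟨k, hsp.1⟩),
            fun m hm => ?_⟩
          have hmk : m = k := pvSph_unique hm hsp
          subst hmk
          simp [pvLvl, hfe, htf]
        · have hfsh : ∀ z ∈ frontier, pvShape start z := fun z hz =>
            pvBallL_shape hlen k z ((Hf z).mp hz).1
          have hvsh : ∀ z ∈ visited, pvShape start z := fun z hz =>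
            pvBallL_shape hlen k z ((Hv z).mp hz)
          have hinv := pvFold_inv hlen frontier (visited, []) ⟨Hnd, hvsh⟩ hfsh
          have hglue := pvFold_glue (w := visited) frontier (visited, []) (by simp)
          set p := frontier.foldl pvExpand (visited, []) with hp
          have hmem1 : ∀ z, z ∈ p.1 ↔ pvBall pvNbL start (k + 1) z := by
            intro z
            rw [hp, pvFold_mem]
            constructor
            · rintro (hz | ⟨x, hx, hzx⟩)
              · exact Or.inl ((Hv z).mp hz)
              · exact Or.inr ⟨x, ((Hf x).mp hx).1, by
                  rcases hzx with rfl | rfl <;> simp [pvNbL]⟩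
            · rintro (hz | ⟨x, hx, hnb⟩)
              · exact Or.inl ((Hv z).mpr hz)
              · obtain ⟨j, hjk, hsp⟩ := pvSph_exists hx
                rcases Nat.lt_or_ge j k with hlt | hge
                · refine Or.inl ((Hv z).mpr (pvBall_mono (show j + 1 ≤ k by omega)
                    (show pvBall pvNbL start (j + 1) z from Or.inr ⟨x, hsp.1, hnb⟩)))
                · have hjk' : j = k := Nat.le_antisymm hjk hge
                  subst hjk'
                  exact Or.inr ⟨x, (Hf x).mpr hsp, by simpa [pvNbL] using hnb⟩
          have hmem2 : ∀ z, z ∈ p.2 ↔ pvSph pvNbL start (k + 1) z := by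
            intro z
            have hnd1 : (visited ++ p.2).Nodup := hglue ▸ hinv.1
            have hdisj := (List.nodup_append.mp hnd1).2.2
            have hiff : z ∈ p.2 ↔ z ∈ p.1 ∧ ¬ z ∈ visited := by
              constructor
              · intro hz
                refine ⟨by rw [hglue]; exact List.mem_append_right _ hz, fun hzv => ?_⟩
                exact hdisj z hzv z hz rfl
              · rintro ⟨hz1, hznv⟩
                rw [hglue] at hz1
                rcases List.mem_append.mp hz1 with h | h
                · exact absurd h hznv
                · exact h
            rw [hiff, hmem1, pvSph_succ_iff]
            constructor
            · rintro ⟨h1, h2⟩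
              exact ⟨h1, fun hb => h2 ((Hv z).mpr hb)⟩
            · rintro ⟨h1, h2⟩
              exact ⟨h1, fun hv => h2 ((Hv z).mp hv)⟩
          have Hprev' : ∀ j, j < k + 1 → ¬ pvBall pvNbL start j target := by
            intro j hj hb
            rcases Nat.lt_or_ge j k with hlt | hge
            · exact Hprev j hlt hb
            · have hbk : pvBall pvNbL start k target := by
                have hjk : j = k := by omega
                exact hjk ▸ hb
              obtain ⟨j', hj'k, hsp⟩ := pvSph_exists hbk
              rcases Nat.lt_or_ge j' k with h | h
              · exact Hprev j' h hsp.1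
              · exact htf ((Hf target).mpr ((Nat.le_antisymm hj'k h) ▸ hsp))
          have hrec : pvLvl target (fuel + 1) frontier visited (k : Int) =
              pvLvl target fuel p.2 p.1 (((k + 1 : Nat) : Int)) := by
            have hc : ((k : Int) + 1) = ((k + 1 : Nat) : Int) := by push_cast; ring
            conv_lhs => rw [pvLvl]
            rw [if_neg hfe, if_neg htf, ← hp, hc]
          rw [hrec]
          have hcard : p.1.length ≤ Nat.factorial (start.take 6).length :=
            pvShape_card p.1 hinv.1 hinv.2
          have hlenp : p.1.length = visited.length + p.2.length := by
            rw [hglue]; simp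
          by_cases hnf : p.2 = []
          · have hempty' : ∀ z, ¬ pvSph pvNbL start (k + 1) z := fun z hz => by
              have := (hmem2 z).mpr hz
              simp [hnf] at this
            have hunreach : ¬ ∃ j, pvBall pvNbL start j target := by
              rintro ⟨j, hj⟩
              have hk1 : pvBall pvNbL start (k + 1) target := pvBall_stab hempty' j target hj
              obtain ⟨j', hj'k, hsp⟩ := pvSph_exists hk1
              rcases Nat.lt_or_ge j' (k + 1) with h | h
              · exact Hprev' j' h hsp.1
              · exact hempty' target ((Nat.le_antisymm hj'k h) ▸ hsp)
            rw [hnf, pvLvl_nil]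
            exact ⟨fun _ => rfl,
              fun m hm => False.elim (hunreach ⟨m, hm.1⟩)⟩
          · have hpos : 1 ≤ p.2.length := by
              cases p2 : p.2 with
              | nil => exact absurd p2 hnf
              | cons _ _ => simp
            exact ih (k + 1) p.2 p.1 hmem1 hmem2 hinv.1 Hprev' (by omega)

-- ---------- bridge: list states = index permutations applied to start ----------

lemma pvLen6 {q : List Int} (hq : q.length = 6) :
    ∃ a b c d e f, q = [a, b, c, d, e, f] := by
  match q, hq with
  | [a, b, c, d, e, f], _ => exact ⟨a, b, c, d, e, f, rfl⟩

lemma pvAppL_eq (a b c d e f : Int) :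
    pvApp pvL [a, b, c, d, e, f] = [d, a, c, e, b, f] := by
  simp only [pvApp, pvL, List.map_cons, List.map_nil]
  simp [pysem]

lemma pvAppR_eq (a b c d e f : Int) :
    pvApp pvR [a, b, c, d, e, f] = [a, e, b, d, f, c] := by
  simp only [pvApp, pvR, List.map_cons, List.map_nil]
  simp [pysem]

lemma pvAppI_eq (a b c d e f : Int) :
    pvApp pvIdent [a, b, c, d, e, f] = [a, b, c, d, e, f] := by
  simp only [pvApp, pvIdent, List.map_cons, List.map_nil]
  simp [pysem]

lemma pvApp_pvL (q : List Int) (hq : q.length = 6) (xs t : List Int) :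
    pvRotL (pvApp q xs ++ t) = pvApp (pvApp pvL q) xs ++ t := by
  obtain ⟨a, b, c, d, e, f, rfl⟩ := pvLen6 hq
  rw [pvAppL_eq]
  simp only [pvApp, List.map_cons, List.map_nil, List.cons_append, List.nil_append]
  rw [pvRotL_explicit]

lemma pvApp_pvR (q : List Int) (hq : q.length = 6) (xs t : List Int) :
    pvRotR (pvApp q xs ++ t) = pvApp (pvApp pvR q) xs ++ t := by
  obtain ⟨a, b, c, d, e, f, rfl⟩ := pvLen6 hq
  rw [pvAppR_eq]
  simp only [pvApp, List.map_cons, List.map_nil, List.cons_append, List.nil_append]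
  rw [pvRotR_explicit]

lemma pvApp_perm {q : List Int} (hq : q.length = 6) :
    (pvApp pvL q).Perm q ∧ (pvApp pvR q).Perm q := by
  obtain ⟨a, b, c, d, e, f, rfl⟩ := pvLen6 hq
  rw [pvAppL_eq, pvAppR_eq]
  constructor <;>
  · refine List.perm_iff_count.mpr fun y => ?_
    simp [List.count_cons]
    ring

lemma pvBallP_perm : ∀ k q, pvBall pvNbP pvIdent k q → q.Perm pvIdent := by
  intro k
  induction k with
  | zero => intro q hq; exact hq ▸ List.Perm.refl _
  | succ k ih =>
      intro q hq
      rcases hq with hq | ⟨x, hx, hnb⟩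
      · exact ih q hq
      · have hxp := ih x hx
        have hxl : x.length = 6 := by simpa [pvIdent] using hxp.length_eq
        rcases (by simpa [pvNbP] using hnb : q = pvApp pvL x ∨ q = pvApp pvR x) with rfl | rfl
        · exact ((pvApp_perm hxl).1).trans hxp
        · exact ((pvApp_perm hxl).2).trans hxp

lemma pvBallP_len {k q} (h : pvBall pvNbP pvIdent k q) : q.length = 6 :=
  (pvBallP_perm k q h).length_eq

lemma pvBridge (start : List Int) (hlen : 6 ≤ start.length) :
    ∀ k y, pvBall pvNbL start k y ↔
      ∃ p, pvBall pvNbP pvIdent k p ∧ y = pvApp p (start.take 6) ++ start.drop 6 := by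
  have hbase : pvApp pvIdent (start.take 6) ++ start.drop 6 = start := by
    obtain ⟨a, b, c, d, e, f, t, rfl⟩ :
        ∃ a b c d e f t, start = a :: b :: c :: d :: e :: f :: t := by
      match start, hlen with
      | a :: b :: c :: d :: e :: f :: t, _ => exact ⟨a, b, c, d, e, f, t, rfl⟩
    simp [pvAppI_eq]
  intro k
  induction k with
  | zero =>
      intro y
      constructor
      · intro hy
        exact ⟨pvIdent, rfl, by rw [hbase]; exact hy⟩
      · rintro ⟨p, rfl, rfl⟩
        rw [hbase]
        rfl
  | succ k ih =>
      intro y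
      constructor
      · rintro (hy | ⟨x, hx, hnb⟩)
        · obtain ⟨p, hp, he⟩ := (ih y).mp hy
          exact ⟨p, Or.inl hp, he⟩
        · obtain ⟨q, hq, rfl⟩ := (ih x).mp hx
          have hql : q.length = 6 := pvBallP_len hq
          rcases (by simpa [pvNbL] using hnb : y = pvRotL _ ∨ y = pvRotR _) with rfl | rfl
          · exact ⟨pvApp pvL q, Or.inr ⟨q, hq, by simp [pvNbP]⟩, pvApp_pvL q hql _ _⟩
          · exact ⟨pvApp pvR q, Or.inr ⟨q, hq, by simp [pvNbP]⟩, pvApp_pvR q hql _ _⟩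
      · rintro ⟨p, hp | ⟨q, hq, hnb⟩, rfl⟩
        · exact Or.inl ((ih _).mpr ⟨p, hp, rfl⟩)
        · have hql : q.length = 6 := pvBallP_len hq
          have hx : pvBall pvNbL start k (pvApp q (start.take 6) ++ start.drop 6) :=
            (ih _).mpr ⟨q, hq, rfl⟩
          rcases (by simpa [pvNbP] using hnb : p = pvApp pvL q ∨ p = pvApp pvR q) with rfl | rfl
          · exact Or.inr ⟨_, hx, by rw [← pvApp_pvL q hql]; simp [pvNbL]⟩
          · exact Or.inr ⟨_, hx, by rw [← pvApp_pvR q hql]; simp [pvNbL]⟩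

-- ---------- B-side: the table maps each permutation to its least level ----------

-- Items glue: a level's expansion appends exactly the new keys, all at value d.
lemma pvTblAdd_glue {d : Int} {w : List (List Int × Int)}
    {acc : PySem.Dict (List Int) Int × List (List Int)}
    (h : acc.1.items = w ++ acc.2.map (fun q => (q, d))) (q : List Int) :
    (pvTblAdd d acc q).1.items = w ++ (pvTblAdd d acc q).2.map (fun q => (q, d)) := by
  unfold pvTblAdd
  split_ifs with hc
  · exact h
  · simp only []
    rw [PySem.Dict.items_insert_of_not_contains _ _ (by simpa using hc), h]
    simp

lemma pvTblExpand_glue {d : Int} {w : List (List Int × Int)}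
    {acc : PySem.Dict (List Int) Int × List (List Int)}
    (h : acc.1.items = w ++ acc.2.map (fun q => (q, d))) (c : List Int) :
    (pvTblExpand d acc c).1.items = w ++ (pvTblExpand d acc c).2.map (fun q => (q, d)) := by
  unfold pvTblExpand
  simp only [List.foldl]
  exact pvTblAdd_glue (pvTblAdd_glue h _) _

lemma pvTblFold_glue {d : Int} {w : List (List Int × Int)} :
    ∀ (l : List (List Int)) (acc : PySem.Dict (List Int) Int × List (List Int)),
      acc.1.items = w ++ acc.2.map (fun q => (q, d)) →
      (l.foldl (pvTblExpand d) acc).1.items =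
        w ++ (l.foldl (pvTblExpand d) acc).2.map (fun q => (q, d)) := by
  intro l
  induction l with
  | nil => intro acc h; exact h
  | cons c r ih => intro acc h; exact ih _ (pvTblExpand_glue h c)

-- Key membership through a level's expansion.
lemma pvTblAdd_memk {d : Int} (acc : PySem.Dict (List Int) Int × List (List Int))
    (q z : List Int) :
    z ∈ (pvTblAdd d acc q).1.keys ↔ z ∈ acc.1.keys ∨ z = q := by
  unfold pvTblAdd
  split_ifs with hc
  · have : q ∈ acc.1.keys := (PySem.Dict.contains_iff_mem_keys _ _).mp hc
    constructor
    · exact Or.inl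
    · rintro (h | rfl) <;> [exact h; exact this]
  · simp only []
    rw [PySem.Dict.mem_keys_insert]
    tauto

lemma pvTblExpand_memk {d : Int} (acc : PySem.Dict (List Int) Int × List (List Int))
    (c z : List Int) :
    z ∈ (pvTblExpand d acc c).1.keys ↔
      z ∈ acc.1.keys ∨ z = pvApp pvL c ∨ z = pvApp pvR c := by
  unfold pvTblExpand
  simp only [List.foldl]
  rw [pvTblAdd_memk, pvTblAdd_memk]
  tauto

lemma pvTblFold_memk {d : Int} :
    ∀ (l : List (List Int)) (acc : PySem.Dict (List Int) Int × List (List Int)) (z : List Int),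
      z ∈ (l.foldl (pvTblExpand d) acc).1.keys ↔
        z ∈ acc.1.keys ∨ ∃ x ∈ l, z = pvApp pvL x ∨ z = pvApp pvR x := by
  intro l
  induction l with
  | nil => simp
  | cons c r ih =>
      intro acc z
      simp only [List.foldl_cons, ih, pvTblExpand_memk, List.mem_cons]
      constructor
      · rintro ((h | h | h) | ⟨x, hx, hh⟩)
        · exact Or.inl h
        · exact Or.inr ⟨c, Or.inl rfl, Or.inl h⟩
        · exact Or.inr ⟨c, Or.inl rfl, Or.inr h⟩
        · exact Or.inr ⟨x, Or.inr hx, hh⟩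
      · rintro (h | ⟨x, (rfl | hx), hh⟩)
        · exact Or.inl (Or.inl h)
        · exact Or.inl (Or.inr hh)
        · exact Or.inr ⟨x, hx, hh⟩

lemma pvTblFold_nodup {d : Int} :
    ∀ (l : List (List Int)) (acc : PySem.Dict (List Int) Int × List (List Int)),
      acc.1.keys.Nodup → (l.foldl (pvTblExpand d) acc).1.keys.Nodup := by
  intro l
  induction l with
  | nil => intro acc h; exact h
  | cons c r ih =>
      intro acc h
      refine ih _ ?_
      unfold pvTblExpand
      simp only [List.foldl]
      have step : ∀ (a : PySem.Dict (List Int) Int × List (List Int)) (q : List Int),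
          a.1.keys.Nodup → (pvTblAdd d a q).1.keys.Nodup := by
        intro a q ha
        unfold pvTblAdd
        split_ifs with hc
        · exact ha
        · exact PySem.Dict.nodup_keys_insert _ _ _ ha
      exact step _ _ (step _ _ h)

-- Distinct permutations of [0..5] number at most 6!.
lemma pvPermCard (ks : List (List Int)) (hnd : ks.Nodup)
    (hp : ∀ q ∈ ks, q.Perm pvIdent) : ks.length ≤ Nat.factorial 6 := by
  have hsub : ks ⊆ pvIdent.permutations := fun q hq =>
    List.mem_permutations.mpr (hp q hq)
  calc ks.length ≤ pvIdent.permutations.length :=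
        (List.subperm_of_subset hnd hsub).length_le
    _ = Nat.factorial 6 := by simp [List.length_permutations, pvIdent]

lemma pvTbl_correct :
    ∀ (fuel k : Nat) (table : PySem.Dict (List Int) Int) (frontier : List (List Int)),
      (∀ p v, (p, v) ∈ table.items ↔ ∃ j, j ≤ k ∧ pvSph pvNbP pvIdent j p ∧ v = (j : Int)) →
      (∀ p, p ∈ frontier ↔ pvSph pvNbP pvIdent k p) →
      table.keys.Nodup →
      (Nat.factorial 6 - table.size) + 2 ≤ fuel →
      ∀ p v, (p, v) ∈ (pvTblLoop fuel table frontier (k : Int)).items ↔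
        ∃ j, pvSph pvNbP pvIdent j p ∧ v = (j : Int) := by
  intro fuel
  induction fuel with
  | zero => intro k table frontier _ _ _ hfuel; exact absurd hfuel (by omega)
  | succ fuel ih =>
      intro k table frontier Hm Hf Hnd Hfuel
      by_cases hfe : frontier = []
      · have hempty : ∀ z, ¬ pvSph pvNbP pvIdent k z := fun z hz => by
          have := (Hf z).mpr hz
          simp [hfe] at this
        have hres : pvTblLoop (fuel + 1) table frontier (k : Int) = table := by
          rw [pvTblLoop, if_pos hfe]
        rw [hres]
        intro p v
        rw [Hm]
        constructor
        · rintro ⟨j, _, hsp, rfl⟩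
          exact ⟨j, hsp, rfl⟩
        · rintro ⟨j, hsp, rfl⟩
          obtain ⟨j', hj'k, hsp'⟩ := pvSph_exists (pvBall_stab hempty j p hsp.1)
          have hj : j = j' := pvSph_unique hsp hsp'
          exact ⟨j, by omega, hsp, rfl⟩
      · have hglue := pvTblFold_glue (d := (k : Int) + 1) (w := table.items)
          frontier (table, []) (by simp)
        set p2 := frontier.foldl (pvTblExpand ((k : Int) + 1)) (table, []) with hp2
        have hkeys : ∀ z, z ∈ table.keys ↔ pvBall pvNbP pvIdent k z := by
          intro z
          constructor
          · intro hz
            obtain ⟨pr, hpr, he⟩ := List.mem_map.mp hz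
            obtain ⟨j, hjk, hsp, _⟩ := (Hm pr.1 pr.2).mp (by simpa using hpr)
            exact he ▸ pvBall_mono hjk hsp.1
          · intro hz
            obtain ⟨j, hjk, hsp⟩ := pvSph_exists hz
            have : (z, (j : Int)) ∈ table.items := (Hm z (j : Int)).mpr ⟨j, hjk, hsp, rfl⟩
            exact List.mem_map.mpr ⟨(z, (j : Int)), this, rfl⟩
        have hmem1 : ∀ z, z ∈ p2.1.keys ↔ pvBall pvNbP pvIdent (k + 1) z := by
          intro z
          rw [hp2, pvTblFold_memk]
          constructor
          · rintro (hz | ⟨x, hx, hzx⟩)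
            · exact Or.inl ((hkeys z).mp hz)
            · exact Or.inr ⟨x, ((Hf x).mp hx).1, by
                rcases hzx with rfl | rfl <;> simp [pvNbP]⟩
          · rintro (hz | ⟨x, hx, hnb⟩)
            · exact Or.inl ((hkeys z).mpr hz)
            · obtain ⟨j, hjk, hsp⟩ := pvSph_exists hx
              rcases Nat.lt_or_ge j k with hlt | hge
              · refine Or.inl ((hkeys z).mpr (pvBall_mono (show j + 1 ≤ k by omega)
                  (show pvBall pvNbP pvIdent (j + 1) z from Or.inr ⟨x, hsp.1, hnb⟩)))
              · have hjk' : j = k := Nat.le_antisymm hjk hge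
                exact Or.inr ⟨x, (Hf x).mpr (hjk' ▸ hsp), by simpa [pvNbP] using hnb⟩
        have hkeyseq : p2.1.keys = table.keys ++ p2.2 := by
          have : p2.1.keys = p2.1.items.map Prod.fst := rfl
          rw [this, hglue]
          simp [PySem.Dict.keys, Function.comp_def]
        have hnd2 : p2.1.keys.Nodup := pvTblFold_nodup frontier (table, []) Hnd
        have hmem2 : ∀ z, z ∈ p2.2 ↔ pvSph pvNbP pvIdent (k + 1) z := by
          intro z
          have hnd1 : (table.keys ++ p2.2).Nodup := hkeyseq ▸ hnd2
          have hdisj := (List.nodup_append.mp hnd1).2.2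
          have hiff : z ∈ p2.2 ↔ z ∈ p2.1.keys ∧ ¬ z ∈ table.keys := by
            constructor
            · intro hz
              refine ⟨by rw [hkeyseq]; exact List.mem_append_right _ hz, fun hzv => ?_⟩
              exact hdisj z hzv z hz rfl
            · rintro ⟨hz1, hznv⟩
              rw [hkeyseq] at hz1
              rcases List.mem_append.mp hz1 with h | h
              · exact absurd h hznv
              · exact h
          rw [hiff, hmem1, pvSph_succ_iff]
          constructor
          · rintro ⟨h1, h2⟩
            exact ⟨h1, fun hb => h2 ((hkeys z).mpr hb)⟩
          · rintro ⟨h1, h2⟩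
            exact ⟨h1, fun hv => h2 ((hkeys z).mp hv)⟩
        have Hm' : ∀ p v, (p, v) ∈ p2.1.items ↔
            ∃ j, j ≤ k + 1 ∧ pvSph pvNbP pvIdent j p ∧ v = (j : Int) := by
          intro p v
          rw [hglue]
          rw [List.mem_append]
          have hcast : ((k : Int) + 1) = ((k + 1 : Nat) : Int) := by push_cast; ring
          constructor
          · rintro (h | h)
            · obtain ⟨j, hjk, hsp, rfl⟩ := (Hm p v).mp h
              exact ⟨j, by omega, hsp, rfl⟩
            · obtain ⟨q, hq, he⟩ := List.mem_map.mp h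
              have hq1 : q = p := congrArg Prod.fst he
              have hq2 : v = (k : Int) + 1 := (congrArg Prod.snd he).symm
              exact ⟨k + 1, le_refl _, (hmem2 p).mp (hq1 ▸ hq), by rw [hq2, hcast]⟩
          · rintro ⟨j, hjk, hsp, rfl⟩
            rcases Nat.lt_or_ge j (k + 1) with hlt | hge
            · exact Or.inl ((Hm p _).mpr ⟨j, by omega, hsp, rfl⟩)
            · have hj : j = k + 1 := by omega
              refine Or.inr (List.mem_map.mpr ⟨p, (hmem2 p).mpr (hj ▸ hsp), ?_⟩)
              rw [hcast, hj]
        have hrec : pvTblLoop (fuel + 1) table frontier (k : Int) =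
            pvTblLoop fuel p2.1 p2.2 (((k + 1 : Nat) : Int)) := by
          have hcast : ((k : Int) + 1) = ((k + 1 : Nat) : Int) := by push_cast; ring
          conv_lhs => rw [pvTblLoop]
          rw [if_neg hfe, ← hp2, hcast]
        rw [hrec]
        have hperm : ∀ q ∈ p2.1.keys, q.Perm pvIdent := fun q hq =>
          pvBallP_perm (k + 1) q ((hmem1 q).mp hq)
        have hcard : p2.1.keys.length ≤ Nat.factorial 6 := pvPermCard _ hnd2 hperm
        have hsz : p2.1.size = p2.1.keys.length := by
          simp [PySem.Dict.size, PySem.Dict.keys]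
        have hszold : table.size = table.keys.length := by
          simp [PySem.Dict.size, PySem.Dict.keys]
        have hlenp : p2.1.keys.length = table.keys.length + p2.2.length := by
          rw [hkeyseq]; simp
        by_cases hnf : p2.2 = []
        · have hempty' : ∀ z, ¬ pvSph pvNbP pvIdent (k + 1) z := fun z hz => by
            have := (hmem2 z).mpr hz
            simp [hnf] at this
          have hres : pvTblLoop fuel p2.1 p2.2 (((k + 1 : Nat) : Int)) = p2.1 := by
            rw [hnf]
            cases fuel <;> simp [pvTblLoop]
          rw [hres]
          intro p v
          rw [Hm' p v]
          constructor
          · rintro ⟨j, _, hsp, rfl⟩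
            exact ⟨j, hsp, rfl⟩
          · rintro ⟨j, hsp, rfl⟩
            obtain ⟨j', hj'k, hsp'⟩ := pvSph_exists (pvBall_stab hempty' j p hsp.1)
            have hj : j = j' := pvSph_unique hsp hsp'
            exact ⟨j, by omega, hsp, rfl⟩
        · have hpos : 1 ≤ p2.2.length := by
            cases p2eq : p2.2 with
            | nil => exact absurd p2eq hnf
            | cons _ _ => simp
          exact ih (k + 1) p2.1 p2.2 Hm' hmem2 hnd2 (by omega)

-- ---------- B-side: the minimum scan ----------

lemma pvSph_zero {nb : List Int → List (List Int)} {s z : List Int} :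
    pvSph nb s 0 z ↔ z = s :=
  ⟨fun h => h.1, fun h => ⟨h, fun j hj => absurd hj (Nat.not_lt_zero j)⟩⟩

lemma pvPermTable_mem (p : List Int) (v : Int) :
    (p, v) ∈ pvPermTable.items ↔ ∃ j, pvSph pvNbP pvIdent j p ∧ v = (j : Int) := by
  have hpt : pvPermTable =
      pvTblLoop (Nat.factorial 6 + 2) (PySem.Dict.ofList [(pvIdent, 0)]) [pvIdent]
        ((0 : Nat) : Int) := rfl
  rw [hpt]
  refine pvTbl_correct (Nat.factorial 6 + 2) 0 _ _ ?_ ?_ ?_ ?_ p v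
  · intro p v
    have hit : (PySem.Dict.ofList [(pvIdent, (0 : Int))]).items = [(pvIdent, 0)] := rfl
    rw [hit]
    simp only [List.mem_singleton, Prod.mk.injEq, Nat.le_zero]
    constructor
    · rintro ⟨rfl, rfl⟩
      exact ⟨0, rfl, pvSph_zero.mpr rfl, rfl⟩
    · rintro ⟨j, rfl, hsp, rfl⟩
      exact ⟨(pvSph_zero.mp hsp).symm ▸ rfl, rfl⟩
  · intro q
    rw [List.mem_singleton]
    exact pvSph_zero.symm
  · decide
  · have := Nat.sub_le (Nat.factorial 6) (PySem.Dict.ofList [(pvIdent, (0 : Int))]).size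
    omega

lemma pvScan_spec (s6 t6 : List Int) :
    ∀ (l : List (List Int × Int)) (b : Int),
      (∀ pd ∈ l, 0 ≤ pd.2) → (b = -1 ∨ 0 ≤ b) →
      (l.foldl (fun best pd =>
          if pvApp pd.1 s6 = t6 ∧ (best = -1 ∨ pd.2 < best) then pd.2 else best) b = b ∨
        ∃ pd ∈ l, pvApp pd.1 s6 = t6 ∧
          l.foldl (fun best pd =>
            if pvApp pd.1 s6 = t6 ∧ (best = -1 ∨ pd.2 < best) then pd.2 else best) b = pd.2) ∧
      (∀ pd ∈ l, pvApp pd.1 s6 = t6 →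
          l.foldl (fun best pd =>
            if pvApp pd.1 s6 = t6 ∧ (best = -1 ∨ pd.2 < best) then pd.2 else best) b ≠ -1 ∧
          l.foldl (fun best pd =>
            if pvApp pd.1 s6 = t6 ∧ (best = -1 ∨ pd.2 < best) then pd.2 else best) b ≤ pd.2) ∧
      (b ≠ -1 →
          l.foldl (fun best pd =>
            if pvApp pd.1 s6 = t6 ∧ (best = -1 ∨ pd.2 < best) then pd.2 else best) b ≠ -1 ∧
          l.foldl (fun best pd =>
            if pvApp pd.1 s6 = t6 ∧ (best = -1 ∨ pd.2 < best) then pd.2 else best) b ≤ b) := by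
  intro l
  induction l with
  | nil => intro b _ _; exact ⟨Or.inl rfl, by simp, fun h => ⟨h, le_refl b⟩⟩
  | cons pd0 r ih =>
      intro b h0 hb
      have h0r : ∀ pd ∈ r, 0 ≤ pd.2 := fun pd hpd => h0 pd (by simp [hpd])
      have h00 : 0 ≤ pd0.2 := h0 pd0 (by simp)
      simp only [List.foldl_cons]
      by_cases hcond : pvApp pd0.1 s6 = t6 ∧ (b = -1 ∨ pd0.2 < b)
      · rw [if_pos hcond]
        obtain ⟨ihp, ihm, ihb⟩ := ih pd0.2 h0r (Or.inr h00)
        have hne : pd0.2 ≠ -1 := by omega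
        refine ⟨?_, ?_, ?_⟩
        · rcases ihp with h | ⟨pd, hpd, hm, he⟩
          · exact Or.inr ⟨pd0, by simp, hcond.1, h⟩
          · exact Or.inr ⟨pd, by simp [hpd], hm, he⟩
        · rintro pd hpd hm
          rcases List.mem_cons.mp hpd with rfl | hpd'
          · exact ⟨(ihb hne).1, (ihb hne).2⟩
          · exact ihm pd hpd' hm
        · intro hbne
          rcases hcond.2 with rfl | hlt
          · exact absurd rfl hbne
          · exact ⟨(ihb hne).1, le_trans (ihb hne).2 (le_of_lt hlt)⟩
      · rw [if_neg hcond]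
        obtain ⟨ihp, ihm, ihb⟩ := ih b h0r hb
        refine ⟨?_, ?_, ihb⟩
        · rcases ihp with h | ⟨pd, hpd, hm, he⟩
          · exact Or.inl h
          · exact Or.inr ⟨pd, by simp [hpd], hm, he⟩
        · rintro pd hpd hm
          rcases List.mem_cons.mp hpd with rfl | hpd'
          · have hble : b ≠ -1 ∧ b ≤ pd.2 := by
              rcases hb with rfl | hb0
              · exact absurd ⟨hm, Or.inl rfl⟩ hcond
              · constructor
                · omega
                · by_contra hle
                  exact hcond ⟨hm, Or.inr (by omega)⟩
            exact ⟨(ihb hble.1).1, le_trans (ihb hble.1).2 hble.2⟩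
          · exact ihm pd hpd' hm

-- Everything put together for the main case (start ≠ target, 6 ≤ start.length).
lemma pvMain (start target : List Int) (hlen : 6 ≤ start.length) (heq : start ≠ target) :
    min_transformations start target = min_transformations_alt start target := by
  have hAlvl := pvA_eq_lvl start target hlen
  have hHv : ∀ z, z ∈ ([start] : PySem.Set (List Int)) ↔ pvBall pvNbL start 0 z := by
    intro z
    rw [List.mem_singleton]
    exact Iff.rfl
  have hHf : ∀ z, z ∈ [start] ↔ pvSph pvNbL start 0 z := by
    intro z
    rw [List.mem_singleton]
    exact pvSph_zero.symm
  have hN : 1 ≤ Nat.factorial (start.take 6).length := Nat.factorial_pos _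
  obtain ⟨hunA, hreachA⟩ := pvLvl_correct start target hlen
    (Nat.factorial (start.take 6).length + 2) 0 [start] [start]
    hHv hHf (by simp) (fun j hj => absurd hj (Nat.not_lt_zero j)) (by simp)
  rw [Nat.cast_zero] at hunA hreachA
  have hts : PySem.List.slice start (some 6) none = start.drop 6 := by
    exact_mod_cast PySem.List.slice_from_natCast start 6
  have htt : PySem.List.slice target (some 6) none = target.drop 6 := by
    exact_mod_cast PySem.List.slice_from_natCast target 6
  have hts' : PySem.List.slice start none (some 6) = start.take 6 := by
    exact_mod_cast PySem.List.slice_to_natCast start 6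
  have htt' : PySem.List.slice target none (some 6) = target.take 6 := by
    exact_mod_cast PySem.List.slice_to_natCast target 6
  by_cases htl : start.drop 6 = target.drop 6
  · have htarget : target = target.take 6 ++ start.drop 6 := by
      rw [htl]
      exact (List.take_append_drop 6 target).symm
    have hB : min_transformations_alt start target =
        pvPermTable.items.foldl
          (fun best pd =>
            if pvApp pd.1 (start.take 6) = target.take 6 ∧ (best = -1 ∨ pd.2 < best)
            then pd.2 else best) (-1) := by
      unfold min_transformations_alt
      rw [if_neg heq, hts, htt, if_neg (by simpa using htl), hts', htt']
    have hvals : ∀ pd ∈ pvPermTable.items, 0 ≤ pd.2 := by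
      intro pd hpd
      obtain ⟨j, _, hv⟩ := (pvPermTable_mem pd.1 pd.2).mp (by simpa using hpd)
      rw [hv]
      exact Int.natCast_nonneg j
    obtain ⟨hprov, hlb, _⟩ :=
      pvScan_spec (start.take 6) (target.take 6) pvPermTable.items (-1) hvals (Or.inl rfl)
    by_cases hreach : ∃ j, pvBall pvNbL start j target
    · have hne : {j | pvBall pvNbL start j target}.Nonempty := hreach
      set m := sInf {j | pvBall pvNbL start j target} with hm
      have hmm : pvBall pvNbL start m target := Nat.sInf_mem hne
      have hsph : pvSph pvNbL start m target := by
        refine ⟨hmm, fun j hj hb => ?_⟩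
        have hle := Nat.sInf_le (show j ∈ {j | pvBall pvNbL start j target} from hb)
        omega
      have hA : min_transformations start target = (m : Int) :=
        hAlvl.trans (hreachA m hsph)
      obtain ⟨p0, hp0, he0⟩ := (pvBridge start hlen m target).mp hmm
      have happ0 : pvApp p0 (start.take 6) = target.take 6 :=
        List.append_cancel_right (by rw [← he0, ← htarget])
      obtain ⟨j0, hj0, hsp0⟩ := pvSph_exists hp0
      have hitem : (p0, (j0 : Int)) ∈ pvPermTable.items :=
        (pvPermTable_mem _ _).mpr ⟨j0, hsp0, rfl⟩
      have hr1 := hlb (p0, (j0 : Int)) hitem happ0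
      rcases hprov with hr | ⟨pd, hpd, hmatch, hrv⟩
      · exact absurd hr hr1.1
      · obtain ⟨j', hsp', hv'⟩ := (pvPermTable_mem pd.1 pd.2).mp (by simpa using hpd)
        have hbl : pvBall pvNbL start j' target :=
          (pvBridge start hlen j' target).mpr ⟨pd.1, hsp'.1, by rw [htarget, hmatch]⟩
        have hmj : m ≤ j' :=
        Nat.sInf_le (show j' ∈ {j | pvBall pvNbL start j target} from hbl)
        have h3 : (j' : Int) ≤ (j0 : Int) := by rw [← hv', ← hrv]; exact hr1.2
        rw [hA, hB, hrv, hv']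
        omega
    · have hA : min_transformations start target = -1 := hAlvl.trans (hunA hreach)
      have hnomatch : ∀ pd ∈ pvPermTable.items, ¬ pvApp pd.1 (start.take 6) = target.take 6 := by
        intro pd hpd hmatch
        obtain ⟨j, hsp, _⟩ := (pvPermTable_mem pd.1 pd.2).mp (by simpa using hpd)
        exact hreach ⟨j, (pvBridge start hlen j target).mpr
          ⟨pd.1, hsp.1, by rw [htarget, hmatch]⟩⟩
      rw [hA, hB]
      rcases hprov with hr | ⟨pd, hpd, hmatch, _⟩
      · exact hr.symm
      · exact absurd hmatch (hnomatch pd hpd)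
  · have hB : min_transformations_alt start target = -1 := by
      unfold min_transformations_alt
      rw [if_neg heq, hts, htt, if_pos (by simpa using htl)]
    have hunreach : ¬ ∃ j, pvBall pvNbL start j target := by
      rintro ⟨j, hj⟩
      exact htl ((pvBallL_shape hlen j target hj).2).symm
    rw [hB]
    exact hAlvl.trans (hunA hunreach)

-- ===== VERDICT (by name: the statement is the Claim_ definition above) =====
theorem min_transformations_spec : Claim_equal_min_transformations := by
  intro start target _ hpre
  unfold Spec_min_transformations
  by_cases heq : start = target
  · subst heq
    have hB : min_transformations_alt start start = 0 := by
      simp [min_transformations_alt]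
    have hA : min_transformations start start = 0 := by
      unfold min_transformations
      simp [pvALoop]
    rw [hA, hB]
  · exact pvMain start target (hpre.resolve_left heq) heq
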